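-- pv_equiv track=rewrite | github.com/altairbaku/AdventOfCode2022 | src/07.py | directory_size_list
-- ===== SOURCE A (Python) =====
-- def directory_size_list(filesystem,index):
--     directory_size = 0
--     directory_sizes = []
--     filesystem_len = len(filesystem)
--     while index != filesystem_len:
--         line = filesystem[index]
--         index += 1
--         if line[2:4] == "cd" and line[5:] != "..\n":
--             index,sub_size_list,sub_size = directory_size_list(filesystem,index)
--             directory_sizes.extend(sub_size_list)
--             directory_size += sub_size
--         elif line[2:4] == "cd" and line[5:] == "..\n":
--             directory_sizes.append(directory_size)
--             return index,directory_sizes,directory_size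
--         elif line[0:3] != "dir" and line[2:4] != "ls":
--             directory_size += int(line.split()[0])
--
--     directory_sizes.append(directory_size)
--     return index,directory_sizes,directory_size
-- ===== SOURCE B (Python) =====
-- def directory_size_list(filesystem, index):
--     n = len(filesystem)
--     stack = [0]
--     sizes = []
--     while index != n:
--         line = filesystem[index]
--         index += 1
--         if line[2:4] == "cd":
--             if line[5:] == "..\n":
--                 total = stack.pop()
--                 sizes.append(total)
--                 if not stack:
--                     return index, sizes, total
--                 stack[-1] += total
--             else:
--                 stack.append(0)
--         elif line[0:3] != "dir" and line[2:4] != "ls":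
--             stack[-1] += int(line.split()[0])
--     total = 0
--     while stack:
--         total = stack.pop()
--         sizes.append(total)
--         if stack:
--             stack[-1] += total
--     return index, sizes, total
-- ===== Notes on version B (the rewrite author's own statement) =====
-- stated objective: alternative
-- what changed: A's re-entrant recursion (one call frame per directory, child size-lists copied into the parent with extend) is replaced by a single iterative loop over the lines keeping an explicit stack of per-directory running sizes, appending each directory total once when its frame is popped.
-- outside the precondition, e.g. on directory_size_list(['1 a'], -1): A returns (1, [2], 2), B returns (1, [2], 2)
import Mathlib
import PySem

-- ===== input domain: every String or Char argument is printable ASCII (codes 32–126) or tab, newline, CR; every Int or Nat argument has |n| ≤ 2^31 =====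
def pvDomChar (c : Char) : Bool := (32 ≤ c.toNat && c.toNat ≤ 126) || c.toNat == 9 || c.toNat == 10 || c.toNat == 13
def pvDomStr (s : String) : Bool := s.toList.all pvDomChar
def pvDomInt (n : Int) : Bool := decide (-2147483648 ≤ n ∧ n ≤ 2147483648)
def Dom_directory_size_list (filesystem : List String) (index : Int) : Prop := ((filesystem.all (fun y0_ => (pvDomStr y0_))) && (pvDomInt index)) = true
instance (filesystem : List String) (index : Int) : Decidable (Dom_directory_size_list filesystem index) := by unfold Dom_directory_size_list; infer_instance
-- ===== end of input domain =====

-- B replaces A's re-entrant recursion by a single iterative scan with an explicit stack of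
-- per-directory running sizes (alternative decomposition, same cost); return values agree on Pre_.

-- ===== PORT A =====
-- value of int(line.split()[0]) (defaulted to 0 where Python would raise; Pre_ excludes those lines)
def pvFileVal (line : String) : Int :=
  ((PySem.List.pyGet? (PySem.Str.split₀ line) 0).bind PySem.Int.ofStr?).getD 0

-- line[2:4] == "cd" / line[5:] == "..\n" / the dir-or-ls test, as A writes them
def pvIsCd (line : String) : Bool := PySem.Str.slice line (some 2) (some 4) == "cd"
def pvIsUp (line : String) : Bool := PySem.Str.slice line (some 5) none == "..\n"
def pvIsFile (line : String) : Bool :=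
  (PySem.Str.slice line (some 0) (some 3) != "dir") && (PySem.Str.slice line (some 2) (some 4) != "ls")

-- A's recursive while-loop; fuel only makes the recursion total (never exhausted inside Pre_)
def pvGoA (fs : List String) : Nat → Int → Int → List Int → Int × List Int × Int
  | 0, index, dsize, dsizes => (index, dsizes ++ [dsize], dsize)
  | fuel+1, index, dsize, dsizes =>
    if index = (fs.length : Int) then (index, dsizes ++ [dsize], dsize)
    else if pvIsCd ((PySem.List.pyGet? fs index).getD "") ∧
            ¬ pvIsUp ((PySem.List.pyGet? fs index).getD "") then
      -- recursive descent; then the loop continues at the returned index with the sub-results folded in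
      pvGoA fs fuel (pvGoA fs fuel (index + 1) 0 []).1
        (dsize + (pvGoA fs fuel (index + 1) 0 []).2.2)
        (dsizes ++ (pvGoA fs fuel (index + 1) 0 []).2.1)
    else if pvIsCd ((PySem.List.pyGet? fs index).getD "") ∧
            pvIsUp ((PySem.List.pyGet? fs index).getD "") then
      (index + 1, dsizes ++ [dsize], dsize)
    else if pvIsFile ((PySem.List.pyGet? fs index).getD "") then
      pvGoA fs fuel (index + 1) (dsize + pvFileVal ((PySem.List.pyGet? fs index).getD "")) dsizes
    else
      pvGoA fs fuel (index + 1) dsize dsizes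

def directory_size_list (filesystem : List String) (index : Int) : Int × List Int × Int :=
  pvGoA filesystem (filesystem.length + index.natAbs + 1) index 0 []

-- ===== PORT B =====
-- the final unwinding loop of Source B: pop each frame, record it, fold it into its parent
def pvUnwind (index : Int) : List Int → List Int → Int → Int × List Int × Int
  | [], sizes, total => (index, sizes, total)
  | [t], sizes, _ => pvUnwind index [] (sizes ++ [t]) t
  | t :: p :: r, sizes, _ => pvUnwind index ((p + t) :: r) (sizes ++ [t]) t
  termination_by stack => stack.length

-- Source B's single while-loop over the lines with an explicit stack (same fuel guard as A's port)
def pvGoB (fs : List String) : Nat → Int → List Int → List Int → Int × List Int × Int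
  | 0, index, stack, sizes => pvUnwind index stack sizes 0
  | fuel+1, index, stack, sizes =>
    if index = (fs.length : Int) then pvUnwind index stack sizes 0
    else if pvIsCd ((PySem.List.pyGet? fs index).getD "") then
      if pvIsUp ((PySem.List.pyGet? fs index).getD "") then
        match stack with
        | [] => pvGoB fs fuel (index + 1) [] sizes   -- unreachable: the stack is never empty in the loop
        | [t] => (index + 1, sizes ++ [t], t)
        | t :: p :: r => pvGoB fs fuel (index + 1) ((p + t) :: r) (sizes ++ [t])
      else
        pvGoB fs fuel (index + 1) (0 :: stack) sizes
    else if pvIsFile ((PySem.List.pyGet? fs index).getD "") then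
      match stack with
      | [] => pvGoB fs fuel (index + 1) [] sizes   -- unreachable likewise
      | t :: rest => pvGoB fs fuel (index + 1) ((t + pvFileVal ((PySem.List.pyGet? fs index).getD "")) :: rest) sizes
    else
      pvGoB fs fuel (index + 1) stack sizes

def directory_size_list_alt (filesystem : List String) (index : Int) : Int × List Int × Int :=
  pvGoB filesystem (filesystem.length + index.natAbs + 1) index [0] []

-- ===== PRECONDITION & SPEC =====
-- is the line one A's file-branch can read without raising (dir/ls line, or first word parses as an int)?
def pvLineOK (line : String) : Bool :=
  (PySem.Str.slice line (some 0) (some 3) == "dir") ||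
  (PySem.Str.slice line (some 2) (some 4) == "ls") ||
  ((PySem.List.pyGet? (PySem.Str.split₀ line) 0).bind PySem.Int.ofStr?).isSome

-- every line A actually reads is OK: scan with a depth counter ('cd name' +1, 'cd ..' -1),
-- stopping at the 'cd ..' that closes depth 0, where A returns and reads no further line
def pvOKFrom : Nat → List String → Bool
  | _, [] => true
  | d, line :: rest =>
    if pvIsCd line then
      if pvIsUp line then (if d = 0 then true else pvOKFrom (d-1) rest)
      else pvOKFrom (d+1) rest
    else pvLineOK line && pvOKFrom d rest

-- Pre_ keeps 0 ≤ index ≤ len (negative indices hit Python's wraparound re-reading; out-of-range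
-- raises IndexError) and requires that every line A actually reads — up to and including the
-- 'cd ..' that ends the top-level call, lines beyond it unconstrained — is a cd/dir/ls line or
-- has an int-parsable first word (int() raises ValueError/IndexError on the others).
def Pre_directory_size_list (filesystem : List String) (index : Int) : Prop :=
  0 ≤ index ∧ index ≤ (filesystem.length : Int) ∧
    pvOKFrom 0 (filesystem.drop index.toNat) = true

instance (filesystem : List String) (index : Int) : Decidable (Pre_directory_size_list filesystem index) := by
  unfold Pre_directory_size_list; infer_instance

def pvWitness_directory_size_list : List String × Int :=
  (["$ cd /\n", "$ ls\n", "100 a.txt\n", "$ cd x\n", "7 b\n", "$ cd ..\n"], 0)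

def Spec_directory_size_list (filesystem : List String) (index : Int) (out : Int × List Int × Int) : Prop := out = directory_size_list_alt filesystem index
instance (filesystem : List String) (index : Int) (out : Int × List Int × Int) : Decidable (Spec_directory_size_list filesystem index out) := by unfold Spec_directory_size_list; infer_instance

-- ===== CLAIM (what is proved, stated in full; the proofs are below) =====
def Claim_equal_directory_size_list : Prop := ∀ (filesystem : List String) (index : Int), Dom_directory_size_list filesystem index → Pre_directory_size_list filesystem index → Spec_directory_size_list filesystem index (directory_size_list filesystem index)

-- ===== LEMMAS AND PROOFS =====

-- one-step equations of pvGoB (its nested matches block the generated equation lemmas)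
theorem pvGoB_zero (fs : List String) (index : Int) (stack sizes : List Int) :
    pvGoB fs 0 index stack sizes = pvUnwind index stack sizes 0 := rfl

theorem pvGoB_succ (fs : List String) (fuel : Nat) (index : Int) (stack sizes : List Int) :
    pvGoB fs (fuel+1) index stack sizes =
      (if index = (fs.length : Int) then pvUnwind index stack sizes 0
       else if pvIsCd ((PySem.List.pyGet? fs index).getD "") then
         if pvIsUp ((PySem.List.pyGet? fs index).getD "") then
           match stack with
           | [] => pvGoB fs fuel (index + 1) [] sizes
           | [t] => (index + 1, sizes ++ [t], t)
           | t :: p :: r => pvGoB fs fuel (index + 1) ((p + t) :: r) (sizes ++ [t])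
         else
           pvGoB fs fuel (index + 1) (0 :: stack) sizes
       else if pvIsFile ((PySem.List.pyGet? fs index).getD "") then
         match stack with
         | [] => pvGoB fs fuel (index + 1) [] sizes
         | t :: rest => pvGoB fs fuel (index + 1) ((t + pvFileVal ((PySem.List.pyGet? fs index).getD "")) :: rest) sizes
       else
         pvGoB fs fuel (index + 1) stack sizes) := rfl

-- A's sizes-list parameter is a pure accumulator
theorem pvGoA_acc (fs : List String) (fuel : Nat) :
    ∀ (index dsize : Int) (l : List Int),
      pvGoA fs fuel index dsize l =
        ((pvGoA fs fuel index dsize []).1,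
         l ++ (pvGoA fs fuel index dsize []).2.1,
         (pvGoA fs fuel index dsize []).2.2) := by
  induction fuel with
  | zero => intro index dsize l; simp [pvGoA]
  | succ fuel ih =>
    intro index dsize l
    rw [pvGoA, pvGoA]
    simp only [List.nil_append]
    split_ifs with h1 h2 h3 h4
    · simp
    · rcases hR : pvGoA fs fuel (index + 1) 0 [] with ⟨i2, ls2, s2⟩
      simp only
      rw [ih i2 (dsize + s2) (l ++ ls2), ih i2 (dsize + s2) ls2]
      simp
    · simp
    · rw [ih (index + 1) (dsize + pvFileVal ((PySem.List.pyGet? fs index).getD "")) l]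
    · rw [ih (index + 1) dsize l]

-- the index A returns stays within [index, len]
theorem pvGoA_bounds (fs : List String) (fuel : Nat) :
    ∀ (index dsize : Int) (l : List Int), 0 ≤ index → index ≤ (fs.length : Int) →
      ((fs.length : Int) - index).toNat ≤ fuel →
      index ≤ (pvGoA fs fuel index dsize l).1 ∧ (pvGoA fs fuel index dsize l).1 ≤ (fs.length : Int) := by
  induction fuel with
  | zero => intro index dsize l h0 h1 h2; simp [pvGoA]; omega
  | succ fuel ih =>
    intro index dsize l h0 h1 h2
    rw [pvGoA]
    split_ifs with h1' hc1 hc2 hc3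
    · simp; omega
    · have hlt : index < (fs.length : Int) := lt_of_le_of_ne h1 h1'
      rcases hR : pvGoA fs fuel (index + 1) 0 [] with ⟨i2, ls2, s2⟩
      have hi := ih (index + 1) 0 [] (by omega) (by omega) (by omega)
      rw [hR] at hi
      simp only at hi ⊢
      have hc := ih i2 (dsize + s2) (l ++ ls2) (by omega) hi.2 (by omega)
      omega
    · have hlt : index < (fs.length : Int) := lt_of_le_of_ne h1 h1'
      simp; omega
    · have hlt : index < (fs.length : Int) := lt_of_le_of_ne h1 h1'
      have hi := ih (index + 1) (dsize + pvFileVal ((PySem.List.pyGet? fs index).getD "")) l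
        (by omega) (by omega) (by omega)
      omega
    · have hlt : index < (fs.length : Int) := lt_of_le_of_ne h1 h1'
      have hi := ih (index + 1) dsize l (by omega) (by omega) (by omega)
      omega

-- B's result likewise
theorem pvGoB_fuel_irrel (fs : List String) (fuel : Nat) :
    ∀ (fuel' : Nat) (index : Int) (stack sizes : List Int), 0 ≤ index → index ≤ (fs.length : Int) →
      ((fs.length : Int) - index).toNat ≤ fuel → ((fs.length : Int) - index).toNat ≤ fuel' →
      pvGoB fs fuel index stack sizes = pvGoB fs fuel' index stack sizes := by
  induction fuel with
  | zero =>
    intro fuel' index stack sizes h0 h1 h2 h3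
    have heq : index = (fs.length : Int) := by omega
    cases fuel' with
    | zero => rfl
    | succ fuel' => rw [pvGoB_zero, pvGoB_succ, if_pos heq]
  | succ fuel ih =>
    intro fuel' index stack sizes h0 h1 h2 h3
    by_cases heq : index = (fs.length : Int)
    · cases fuel' with
      | zero => rw [pvGoB_succ, pvGoB_zero, if_pos heq]
      | succ fuel' => rw [pvGoB_succ, pvGoB_succ, if_pos heq, if_pos heq]
    · have hlt : index < (fs.length : Int) := lt_of_le_of_ne h1 heq
      cases fuel' with
      | zero => omega
      | succ fuel' =>
        rw [pvGoB_succ, pvGoB_succ, if_neg heq, if_neg heq]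
        split_ifs with hc1 hc2 hc3
        · match stack with
          | [] => exact ih fuel' (index + 1) [] sizes (by omega) (by omega) (by omega) (by omega)
          | [t] => rfl
          | t :: p :: r => exact ih fuel' (index + 1) _ _ (by omega) (by omega) (by omega) (by omega)
        · exact ih fuel' (index + 1) _ sizes (by omega) (by omega) (by omega) (by omega)
        · match stack with
          | [] => exact ih fuel' (index + 1) [] sizes (by omega) (by omega) (by omega) (by omega)
          | t :: rest => exact ih fuel' (index + 1) _ sizes (by omega) (by omega) (by omega) (by omega)
        · exact ih fuel' (index + 1) stack sizes (by omega) (by omega) (by omega) (by omega)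

-- the initial 'total' of the unwinding loop is overwritten as soon as the stack is nonempty
theorem pvUnwind_total_irrel (index : Int) (stack sizes : List Int) (t t' : Int)
    (h : stack ≠ []) : pvUnwind index stack sizes t = pvUnwind index stack sizes t' := by
  match stack with
  | [] => exact absurd rfl h
  | [a] => simp [pvUnwind]
  | a :: b :: r => rw [pvUnwind, pvUnwind]

-- the simulation invariant: B's loop with stack (d :: rest) runs A's current frame (accumulator d)
-- to its close and then continues on the popped stack
set_option maxHeartbeats 1000000 in
theorem pvGoB_simulates (fs : List String) (fuel : Nat) :
    ∀ (index d : Int) (rest sizes : List Int), 0 ≤ index → index ≤ (fs.length : Int) →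
      ((fs.length : Int) - index).toNat ≤ fuel →
      pvGoB fs fuel index (d :: rest) sizes =
        (match rest with
         | [] => ((pvGoA fs fuel index d []).1,
                  sizes ++ (pvGoA fs fuel index d []).2.1,
                  (pvGoA fs fuel index d []).2.2)
         | p :: r => pvGoB fs fuel (pvGoA fs fuel index d []).1
                       ((p + (pvGoA fs fuel index d []).2.2) :: r)
                       (sizes ++ (pvGoA fs fuel index d []).2.1)) := by
  induction fuel with
  | zero =>
    intro index d rest sizes h0 h1 h2
    have heq : index = (fs.length : Int) := by omega
    cases rest with
    | nil =>
      rw [pvGoB_zero]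
      simp [pvGoA, pvUnwind]
    | cons p r =>
      rw [pvGoB_zero]
      simp only [pvGoA, List.nil_append]
      rw [pvGoB_zero, pvUnwind]
      exact pvUnwind_total_irrel _ _ _ d 0 (by simp)
  | succ fuel ih =>
    intro index d rest sizes h0 h1 h2
    by_cases heq : index = (fs.length : Int)
    · cases rest with
      | nil =>
        rw [pvGoB_succ, if_pos heq]
        simp [pvGoA, pvUnwind, if_pos heq]
      | cons p r =>
        rw [pvGoB_succ, if_pos heq]
        rw [pvGoA, if_pos heq]
        dsimp only
        rw [pvGoB_succ, if_pos heq, pvUnwind]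
        simp only [List.nil_append]
        exact pvUnwind_total_irrel _ _ _ d 0 (by simp)
    · have hlt : index < (fs.length : Int) := lt_of_le_of_ne h1 heq
      rw [pvGoB_succ, pvGoA]
      simp only [if_neg heq]
      by_cases hc1 : pvIsCd ((PySem.List.pyGet? fs index).getD "") = true
      · by_cases hc2 : pvIsUp ((PySem.List.pyGet? fs index).getD "") = true
        · -- 'cd ..' : pop
          rw [if_pos hc1, if_pos hc2, if_neg (fun h => h.2 hc2), if_pos ⟨hc1, hc2⟩]
          cases rest with
          | nil => rfl
          | cons p r =>
            dsimp only
            exact pvGoB_fuel_irrel fs fuel (fuel + 1) (index + 1) _ _ (by omega) (by omega) (by omega) (by omega)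
        · -- 'cd name' : push a frame / A recurses
          rw [if_pos hc1, if_neg hc2, if_pos ⟨hc1, hc2⟩]
          rw [ih (index + 1) 0 (d :: rest) sizes (by omega) (by omega) (by omega)]
          have hbR := pvGoA_bounds fs fuel (index + 1) 0 [] (by omega) (by omega) (by omega)
          rcases hR : pvGoA fs fuel (index + 1) 0 [] with ⟨i2, ls2, s2⟩
          rw [hR] at hbR
          dsimp only at hbR ⊢
          simp only [List.nil_append]
          have hbX := pvGoA_bounds fs fuel i2 (d + s2) [] (by omega) hbR.2 (by omega)
          rw [pvGoA_acc fs fuel i2 (d + s2) ls2]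
          rw [ih i2 (d + s2) rest (sizes ++ ls2) (by omega) hbR.2 (by omega)]
          rcases hX : pvGoA fs fuel i2 (d + s2) [] with ⟨i3, ls3, s3⟩
          rw [hX] at hbX
          dsimp only at hbX ⊢
          cases rest with
          | nil => simp
          | cons p r =>
            dsimp only
            simp only [List.append_assoc]
            exact pvGoB_fuel_irrel fs fuel (fuel + 1) i3 _ _ (by omega) hbX.2 (by omega) (by omega)
      · -- not a cd line
        rw [if_neg hc1,
            if_neg (show ¬(pvIsCd ((PySem.List.pyGet? fs index).getD "") = true ∧
              ¬ pvIsUp ((PySem.List.pyGet? fs index).getD "") = true) from fun h => hc1 h.1),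
            if_neg (show ¬(pvIsCd ((PySem.List.pyGet? fs index).getD "") = true ∧
              pvIsUp ((PySem.List.pyGet? fs index).getD "") = true) from fun h => hc1 h.1)]
        by_cases hc3 : pvIsFile ((PySem.List.pyGet? fs index).getD "") = true
        · rw [if_pos hc3, if_pos hc3]
          rw [ih (index + 1) (d + pvFileVal ((PySem.List.pyGet? fs index).getD "")) rest sizes
            (by omega) (by omega) (by omega)]
          have hbY := pvGoA_bounds fs fuel (index + 1)
            (d + pvFileVal ((PySem.List.pyGet? fs index).getD "")) [] (by omega) (by omega) (by omega)
          cases rest with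
          | nil => rfl
          | cons p r =>
            dsimp only
            exact pvGoB_fuel_irrel fs fuel (fuel + 1) _ _ _ (by omega) hbY.2 (by omega) (by omega)
        · rw [if_neg hc3, if_neg hc3]
          rw [ih (index + 1) d rest sizes (by omega) (by omega) (by omega)]
          have hbZ := pvGoA_bounds fs fuel (index + 1) d [] (by omega) (by omega) (by omega)
          cases rest with
          | nil => rfl
          | cons p r =>
            dsimp only
            exact pvGoB_fuel_irrel fs fuel (fuel + 1) _ _ _ (by omega) hbZ.2 (by omega) (by omega)

-- ===== VERDICT (by name: the statement is the Claim_ definition above) =====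
theorem directory_size_list_spec : Claim_equal_directory_size_list := by
  intro fs index _ hpre
  obtain ⟨h0, h1, _⟩ := hpre
  unfold Spec_directory_size_list directory_size_list directory_size_list_alt
  rw [pvGoB_simulates fs (fs.length + index.natAbs + 1) index 0 [] [] h0 h1 (by omega)]
  simp
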